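-- pv_equiv track=rewrite | github.com/Diptakuet/DimShield | CW/OLIVETTI/CW.py | build_iters_sweep
-- ===== SOURCE A (Python) =====
-- def build_iters_sweep(start: int, end: int, step: int):
--     """Inclusive range builder; supports positive or negative step."""
--     start, end, step = int(start), int(end), int(step)
--     if step == 0:
--         raise ValueError("MAX_ITERS_STEP must be non-zero.")
--     vals = []
--     i = start
--     if step > 0:
--         while i <= end:
--             vals.append(int(i))
--             i += step
--     else:
--         while i >= end:
--             vals.append(int(i))
--             i += step
--     if not vals:
--         raise ValueError(f"No values generated for max_iterations: start={start}, end={end}, step={step}")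
--     return vals
-- ===== SOURCE B (Python) =====
-- def build_iters_sweep(start: int, end: int, step: int):
--     """Inclusive range builder; closed-form element count instead of a stepping loop."""
--     start, end, step = int(start), int(end), int(step)
--     if step == 0:
--         raise ValueError("MAX_ITERS_STEP must be non-zero.")
--     n = (end - start) // step + 1
--     vals = [start + k * step for k in range(n)]
--     if not vals:
--         raise ValueError(f"No values generated for max_iterations: start={start}, end={end}, step={step}")
--     return vals
-- ===== Notes on version B (the rewrite author's own statement) =====
-- stated objective: alternative
-- what changed: Replaces A's stepping while-loop accumulation with a closed-form element count n = (end - start) // step + 1 and a comprehension generating start + k*step for k in range(n).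
import Mathlib
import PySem

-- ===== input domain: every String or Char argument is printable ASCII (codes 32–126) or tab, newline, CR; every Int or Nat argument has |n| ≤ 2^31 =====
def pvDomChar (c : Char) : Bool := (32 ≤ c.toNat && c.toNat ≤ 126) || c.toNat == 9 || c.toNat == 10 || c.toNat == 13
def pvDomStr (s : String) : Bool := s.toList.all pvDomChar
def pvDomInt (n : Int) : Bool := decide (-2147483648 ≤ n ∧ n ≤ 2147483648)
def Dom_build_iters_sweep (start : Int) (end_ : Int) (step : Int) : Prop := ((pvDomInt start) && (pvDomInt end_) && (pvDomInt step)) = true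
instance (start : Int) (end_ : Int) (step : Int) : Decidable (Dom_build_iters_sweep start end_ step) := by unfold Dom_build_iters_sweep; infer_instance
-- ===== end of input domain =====

-- B replaces A's stepping while-loop with a closed-form element count and an indexed comprehension (alternative decomposition, same cost).

-- ===== PORT A =====
-- the positive-step while loop: while i <= end: vals.append(i); i += step
def pvALoopPos (end_ step i : Int) : List Int :=
  if _h : 0 < step ∧ i ≤ end_ then i :: pvALoopPos end_ step (i + step) else []
termination_by (end_ + 1 - i).toNat
decreasing_by omega

-- the negative-step while loop: while i >= end: vals.append(i); i += step
def pvALoopNeg (end_ step i : Int) : List Int :=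
  if _h : step < 0 ∧ end_ ≤ i then i :: pvALoopNeg end_ step (i + step) else []
termination_by (i + 1 - end_).toNat
decreasing_by omega

def build_iters_sweep (start : Int) (end_ : Int) (step : Int) : List Int :=
  if step = 0 then []  -- Python raises ValueError here; excluded by Pre_
  else if 0 < step then pvALoopPos end_ step start
  else pvALoopNeg end_ step start
  -- A's trailing 'if not vals: raise ValueError' is an exception path, excluded by Pre_

-- ===== PORT B =====
def build_iters_sweep_alt (start : Int) (end_ : Int) (step : Int) : List Int :=
  if step = 0 then []  -- Python raises ValueError here; excluded by Pre_
  else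
    let n := PySem.Int.floordiv (end_ - start) step + 1   -- (end - start) // step + 1
    (List.range n.toNat).map (fun k : Nat => start + (k : Int) * step)  -- [start + k*step for k in range(n)]
  -- Source B's trailing 'if not vals: raise ValueError' is an exception path, excluded by Pre_

-- ===== PRECONDITION & SPEC =====
-- Pre_ excludes exactly the inputs on which A (and B) raise ValueError: step = 0,
-- or start already past end_ in the step's direction (vals empty, both raise).
def Pre_build_iters_sweep (start : Int) (end_ : Int) (step : Int) : Prop :=
  (0 < step ∧ start ≤ end_) ∨ (step < 0 ∧ end_ ≤ start)
instance (start : Int) (end_ : Int) (step : Int) : Decidable (Pre_build_iters_sweep start end_ step) := by unfold Pre_build_iters_sweep; infer_instance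

def pvWitness_build_iters_sweep : Int × Int × Int := (0, 10, 3)

def Spec_build_iters_sweep (start : Int) (end_ : Int) (step : Int) (out : List Int) : Prop := out = build_iters_sweep_alt start end_ step
instance (start : Int) (end_ : Int) (step : Int) (out : List Int) : Decidable (Spec_build_iters_sweep start end_ step out) := by unfold Spec_build_iters_sweep; infer_instance

-- ===== CLAIM (what is proved, stated in full; the proofs are below) =====
def Claim_equal_build_iters_sweep : Prop := ∀ (start : Int) (end_ : Int) (step : Int), Dom_build_iters_sweep start end_ step → Pre_build_iters_sweep start end_ step → Spec_build_iters_sweep start end_ step (build_iters_sweep start end_ step)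

-- ===== LEMMAS AND PROOFS =====

-- one loop iteration consumes one element of the closed-form count (0 ≤ a, 0 < s)
theorem pv_count_succ (a s : Int) (hs : 0 < s) (h : 0 ≤ a) :
    (PySem.Int.floordiv a s + 1).toNat = (PySem.Int.floordiv (a - s) s + 1).toNat + 1 := by
  set q := PySem.Int.floordiv (a - s) s with hqdef
  have hq : q * s ≤ a - s ∧ a - s < (q + 1) * s := (PySem.Int.floordiv_eq_iff_of_pos hs).mp hqdef.symm
  have hfa : PySem.Int.floordiv a s = q + 1 :=
    (PySem.Int.floordiv_eq_iff_of_pos hs).mpr ⟨by nlinarith [hq.1], by nlinarith [hq.2]⟩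
  have hpos : 0 < q + 2 := by nlinarith [hq.2]
  omega

-- the count is zero once the loop guard fails (a < 0, 0 < s)
theorem pv_count_zero (a s : Int) (hs : 0 < s) (h : a < 0) :
    (PySem.Int.floordiv a s + 1).toNat = 0 := by
  have : PySem.Int.floordiv a s < 0 := (PySem.Int.floordiv_lt_iff_lt_mul hs).mpr (by simpa)
  omega

theorem pv_loopPos_eq (end_ step i : Int) (hs : 0 < step) :
    pvALoopPos end_ step i =
      (List.range (PySem.Int.floordiv (end_ - i) step + 1).toNat).map (fun k : Nat => i + (k : Int) * step) := by
  fun_induction pvALoopPos end_ step i with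
  | case1 i h ih =>
    rw [pv_count_succ (end_ - i) step hs (by omega), List.range_succ_eq_map, List.map_cons, List.map_map]
    have he : end_ - i - step = end_ - (i + step) := by ring
    rw [he, ih]
    congr 1
    · push_cast; ring
    · apply List.map_congr_left
      intro k _
      simp only [Function.comp_apply]
      push_cast
      ring
  | case2 i h =>
    rw [pv_count_zero (end_ - i) step hs (by omega), List.range_zero, List.map_nil]

theorem pv_loopNeg_eq (end_ step i : Int) (hs : step < 0) :
    pvALoopNeg end_ step i =
      (List.range (PySem.Int.floordiv (end_ - i) step + 1).toNat).map (fun k : Nat => i + (k : Int) * step) := by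
  fun_induction pvALoopNeg end_ step i with
  | case1 i h ih =>
    have c : ∀ x : Int, PySem.Int.floordiv x step = PySem.Int.floordiv (-x) (-step) := fun x => by
      simp
    have hcount : (PySem.Int.floordiv (end_ - i) step + 1).toNat
        = (PySem.Int.floordiv (end_ - (i + step)) step + 1).toNat + 1 := by
      rw [c (end_ - i), c (end_ - (i + step)),
        show -(end_ - (i + step)) = -(end_ - i) - -step by ring]
      exact pv_count_succ (-(end_ - i)) (-step) (by omega) (by omega)
    rw [hcount, List.range_succ_eq_map, List.map_cons, List.map_map, ih]
    congr 1
    · push_cast; ring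
    · apply List.map_congr_left
      intro k _
      simp only [Function.comp_apply]
      push_cast
      ring
  | case2 i h =>
    have hcount : (PySem.Int.floordiv (end_ - i) step + 1).toNat = 0 := by
      rw [show PySem.Int.floordiv (end_ - i) step = PySem.Int.floordiv (-(end_ - i)) (-step) by
        simpa using PySem.Int.floordiv_neg_neg (-(end_ - i)) (-step)]
      exact pv_count_zero (-(end_ - i)) (-step) (by omega) (by omega)
    rw [hcount, List.range_zero, List.map_nil]

-- ===== VERDICT (by name: the statement is the Claim_ definition above) =====
theorem build_iters_sweep_spec : Claim_equal_build_iters_sweep := by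
  intro start end_ step _ hp
  unfold Spec_build_iters_sweep build_iters_sweep build_iters_sweep_alt
  rcases hp with ⟨hs, _⟩ | ⟨hs, _⟩
  · rw [if_neg (show ¬ step = 0 by omega), if_pos hs, if_neg (show ¬ step = 0 by omega),
      pv_loopPos_eq end_ step start hs]
  · rw [if_neg (show ¬ step = 0 by omega), if_neg (show ¬ 0 < step by omega),
      if_neg (show ¬ step = 0 by omega), pv_loopNeg_eq end_ step start hs]
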